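-- pv_equiv track=rewrite | github.com/TianyiLu9494/MtbTk | src/mtbtk/tbva/lineage_identifier.py | check_lineage
-- ===== SOURCE A (Python) =====
-- def check_lineage(match_lineage:list):
--     identified_lineage = match_lineage[0]
--     for lineage in match_lineage:
--         if len(lineage) > len(identified_lineage):
--             # 检查是否是子谱系
--             if lineage.startswith(identified_lineage):
--                 identified_lineage = lineage
--             else:
--                 return 'conflict_lineages'
--         else:
--             # 检查是否是父谱系
--             if identified_lineage.startswith(lineage):
--                 pass
--             else:
--                 return 'conflict_lineages'
--     return identified_lineage
-- ===== SOURCE B (Python) =====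
-- def check_lineage(match_lineage: list):
--     # Pass 1: first element of maximum length (match_lineage[0] preserves IndexError on empty input).
--     longest = match_lineage[0]
--     for lineage in match_lineage:
--         if len(lineage) > len(longest):
--             longest = lineage
--     # Pass 2: every element must be a prefix of the longest, else conflict.
--     for lineage in match_lineage:
--         if not longest.startswith(lineage):
--             return 'conflict_lineages'
--     return longest
-- ===== Notes on version B (the rewrite author's own statement) =====
-- stated objective: simpler
-- what changed: Instead of one stateful scan that compares each element against an evolving candidate with two prefix-direction branches, B first finds the first longest element and then does a plain second pass checking that every element is a prefix of it.
-- outside the precondition, e.g. on check_lineage([]): A raises IndexError, B raises IndexError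
import Mathlib
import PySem

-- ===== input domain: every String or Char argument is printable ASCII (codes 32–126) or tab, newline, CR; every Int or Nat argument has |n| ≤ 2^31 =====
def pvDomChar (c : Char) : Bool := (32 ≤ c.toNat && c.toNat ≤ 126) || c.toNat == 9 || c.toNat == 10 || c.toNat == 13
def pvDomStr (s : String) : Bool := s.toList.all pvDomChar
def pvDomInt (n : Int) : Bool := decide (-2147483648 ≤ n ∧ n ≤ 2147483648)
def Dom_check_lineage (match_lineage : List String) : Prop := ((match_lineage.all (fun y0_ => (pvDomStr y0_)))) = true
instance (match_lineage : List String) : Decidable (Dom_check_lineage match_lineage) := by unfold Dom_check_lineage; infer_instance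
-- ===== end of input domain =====

-- B replaces A's single stateful scan (evolving candidate, two prefix-direction branches)
-- by two plain passes: find the first longest element, then check every element is its prefix.
-- Return-value equivalence proved on all non-empty lists (both raise IndexError on []).

-- ===== PORT A =====
-- A's for-loop with early return, carrying identified_lineage
def checkLoopA (identified : String) : List String → String
  | [] => identified
  | lineage :: rest =>
    if PySem.Str.len lineage > PySem.Str.len identified then
      if PySem.Str.startswith lineage identified then checkLoopA lineage rest
      else "conflict_lineages"
    else
      if PySem.Str.startswith identified lineage then checkLoopA identified rest
      else "conflict_lineages"

def check_lineage (match_lineage : List String) : String :=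
  match match_lineage with
  | [] => ""   -- match_lineage[0] raises IndexError; excluded by Pre_
  | x :: _ => checkLoopA x match_lineage

-- ===== PORT B =====
-- B's first pass: keep the longer element (strict >, so ties keep the first)
def pickLonger (acc lineage : String) : String :=
  if PySem.Str.len lineage > PySem.Str.len acc then lineage else acc

-- B's second pass: early return 'conflict_lineages' at the first non-prefix element
def scanPrefixes (longest : String) : List String → String
  | [] => longest
  | lineage :: rest =>
    if PySem.Str.startswith longest lineage then scanPrefixes longest rest
    else "conflict_lineages"

def check_lineage_alt (match_lineage : List String) : String :=
  match match_lineage with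
  | [] => ""   -- match_lineage[0] raises IndexError; excluded by Pre_
  | x :: _ => scanPrefixes (match_lineage.foldl pickLonger x) match_lineage

-- ===== PRECONDITION & SPEC =====
-- Pre_ excludes only the empty list, on which A (and B) raise IndexError.
def Pre_check_lineage (match_lineage : List String) : Prop := match_lineage ≠ []
instance (match_lineage : List String) : Decidable (Pre_check_lineage match_lineage) := by unfold Pre_check_lineage; infer_instance
def pvWitness_check_lineage : List String := ["lineage4", "lineage4.1"]

def Spec_check_lineage (match_lineage : List String) (out : String) : Prop := out = check_lineage_alt match_lineage
instance (match_lineage : List String) (out : String) : Decidable (Spec_check_lineage match_lineage out) := by unfold Spec_check_lineage; infer_instance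

-- ===== CLAIM (what is proved, stated in full; the proofs are below) =====
def Claim_equal_check_lineage : Prop := ∀ (match_lineage : List String), Dom_check_lineage match_lineage → Pre_check_lineage match_lineage → Spec_check_lineage match_lineage (check_lineage match_lineage)

-- ===== LEMMAS AND PROOFS =====

-- startswith as a list-prefix proposition
theorem sw_iff (a b : String) :
    PySem.Str.startswith a b = true ↔ b.toList <+: a.toList := by
  simp [PySem.Chars.startswith_iff]

theorem len_lt_iff (a b : String) :
    PySem.Str.len a < PySem.Str.len b ↔ a.toList.length < b.toList.length := by
  simp

-- B's second pass returns the longest iff every element is its prefix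
theorem scan_eq_all (longest : String) (xs : List String) :
    scanPrefixes longest xs =
      if (xs.all fun l => PySem.Str.startswith longest l) = true then longest
      else "conflict_lineages" := by
  induction xs with
  | nil => simp [scanPrefixes]
  | cons l rest ih =>
    by_cases h : PySem.Str.startswith longest l = true
    · rw [show scanPrefixes longest (l :: rest) = scanPrefixes longest rest from by
            simp only [scanPrefixes, if_pos h], ih, List.all_cons, h, Bool.true_and]
    · have hc : ¬ (((l :: rest).all fun l => PySem.Str.startswith longest l) = true) := by
        intro hall
        rw [List.all_cons, Bool.and_eq_true] at hall
        exact h hall.1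
      rw [show scanPrefixes longest (l :: rest) = "conflict_lineages" from by
            simp only [scanPrefixes, if_neg h], if_neg hc]

-- main invariant of A's loop: it equals "fold for the longest, then everything
-- (including the running seed) a prefix of it"
theorem loopA_eq (xs : List String) : ∀ (id : String),
    checkLoopA id xs =
      if (((xs.all fun l => PySem.Str.startswith (xs.foldl pickLonger id) l) &&
           PySem.Str.startswith (xs.foldl pickLonger id) id) = true) then
        xs.foldl pickLonger id
      else "conflict_lineages" := by
  induction xs with
  | nil =>
    intro id
    have h : PySem.Chars.startswith id.toList id.toList = true := by
      simp [PySem.Chars.startswith_iff]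
    simp [checkLoopA, h]
  | cons l rest ih =>
    intro id
    by_cases hlen : PySem.Str.len l > PySem.Str.len id
    · have hpick : pickLonger id l = l := by simp only [pickLonger, if_pos hlen]
      by_cases hsw : PySem.Str.startswith l id = true
      · -- candidate advances to l
        rw [show checkLoopA id (l :: rest) = checkLoopA l rest from by
              simp only [checkLoopA, if_pos hlen, if_pos hsw], ih l]
        simp only [List.foldl_cons, hpick, List.all_cons]
        refine if_congr ?_ rfl rfl
        simp only [Bool.and_eq_true, List.all_eq_true, sw_iff]
        have hid : id.toList <+: l.toList := (sw_iff _ _).1 hsw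
        constructor
        · rintro ⟨hall, hl⟩; exact ⟨⟨hl, hall⟩, hid.trans hl⟩
        · rintro ⟨⟨hl, hall⟩, -⟩; exact ⟨hall, hl⟩
      · -- conflict: l is longer but not a descendant of the candidate
        rw [show checkLoopA id (l :: rest) = "conflict_lineages" from by
              simp only [checkLoopA, if_pos hlen, if_neg hsw]]
        simp only [List.foldl_cons, hpick, List.all_cons]
        rw [if_neg]
        simp only [Bool.and_eq_true, List.all_eq_true, sw_iff]
        rintro ⟨⟨hl, -⟩, hid⟩
        have hle : id.toList.length ≤ l.toList.length :=
          le_of_lt ((len_lt_iff id l).1 hlen)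
        exact hsw ((sw_iff _ _).2 (List.prefix_of_prefix_length_le hid hl hle))
    · have hpick : pickLonger id l = id := by simp only [pickLonger, if_neg hlen]
      by_cases hsw : PySem.Str.startswith id l = true
      · -- candidate stays
        rw [show checkLoopA id (l :: rest) = checkLoopA id rest from by
              simp only [checkLoopA, if_neg hlen, if_pos hsw], ih id]
        simp only [List.foldl_cons, hpick, List.all_cons]
        refine if_congr ?_ rfl rfl
        simp only [Bool.and_eq_true, List.all_eq_true, sw_iff]
        have hli : l.toList <+: id.toList := (sw_iff _ _).1 hsw
        constructor
        · rintro ⟨hall, hid⟩; exact ⟨⟨hli.trans hid, hall⟩, hid⟩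
        · rintro ⟨⟨-, hall⟩, hid⟩; exact ⟨hall, hid⟩
      · -- conflict: l is no ancestor of the candidate
        rw [show checkLoopA id (l :: rest) = "conflict_lineages" from by
              simp only [checkLoopA, if_neg hlen, if_neg hsw]]
        simp only [List.foldl_cons, hpick, List.all_cons]
        rw [if_neg]
        simp only [Bool.and_eq_true, List.all_eq_true, sw_iff]
        rintro ⟨⟨hl, -⟩, hid⟩
        have hle : l.toList.length ≤ id.toList.length :=
          Nat.le_of_not_lt (fun hh => hlen ((len_lt_iff id l).2 hh))
        exact hsw ((sw_iff _ _).2 (List.prefix_of_prefix_length_le hl hid hle))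

-- ===== VERDICT (by name: the statement is the Claim_ definition above) =====
theorem check_lineage_spec : Claim_equal_check_lineage := by
  intro ml _ hpre
  unfold Spec_check_lineage
  cases ml with
  | nil => exact absurd rfl hpre
  | cons x t =>
    show checkLoopA x (x :: t) = scanPrefixes (List.foldl pickLonger x (x :: t)) (x :: t)
    have hsw0 : PySem.Str.startswith x x = true := (sw_iff _ _).2 (List.prefix_refl _)
    have hlen0 : ¬ PySem.Str.len x > PySem.Str.len x := lt_irrefl _
    have hpick0 : pickLonger x x = x := by simp only [pickLonger, if_neg hlen0]
    rw [show checkLoopA x (x :: t) = checkLoopA x t from by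
          simp only [checkLoopA, if_neg hlen0, if_pos hsw0], loopA_eq, scan_eq_all]
    simp only [List.foldl_cons, hpick0, List.all_cons]
    refine if_congr ?_ rfl rfl
    rw [Bool.and_comm (t.all fun l => PySem.Str.startswith (List.foldl pickLonger x t) l)]
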